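-- pv_equiv track=rewrite | github.com/lutong9527/ssqtest | ssq_backend/services/entropy_model.py | _check_zone_balance
-- ===== SOURCE A (Python) =====
-- from typing import List, Tuple, Optional
--
-- def _check_zone_balance(reds: List[int]) -> bool:
--     """
--     检查区间分布是否平衡
--
--     红球33个号码分为3个区间：
--         1-11：第一区间
--         12-22：第二区间
--         23-33：第三区间
--
--     约束条件：每个区间必须有1-3个号码
--
--     参数：
--         reds: 红球列表（6个号码）
--
--     返回：
--         bool: 是否满足区间平衡条件
--     """
--     zone1 = len([r for r in reds if 1 <= r <= 11])
--     zone2 = len([r for r in reds if 12 <= r <= 22])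
--     zone3 = len([r for r in reds if 23 <= r <= 33])
--
--     # 检查每个区间是否有1-3个号码
--     return (
--         1 <= zone1 <= 3 and
--         1 <= zone2 <= 3 and
--         1 <= zone3 <= 3
--     )
-- ===== SOURCE B (Python) =====
-- from typing import List
--
-- def _check_zone_balance(reds: List[int]) -> bool:
--     counts = [0, 0, 0]
--     for r in reds:
--         if 1 <= r <= 33:
--             counts[(r - 1) // 11] += 1
--     return all(1 <= c <= 3 for c in counts)
-- ===== Notes on version B (the rewrite author's own statement) =====
-- stated objective: simpler
-- what changed: Replaces three separate filter-and-count comprehensions with a single pass that arithmetically buckets each ball into counts[(r-1)//11].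
import Mathlib
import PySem

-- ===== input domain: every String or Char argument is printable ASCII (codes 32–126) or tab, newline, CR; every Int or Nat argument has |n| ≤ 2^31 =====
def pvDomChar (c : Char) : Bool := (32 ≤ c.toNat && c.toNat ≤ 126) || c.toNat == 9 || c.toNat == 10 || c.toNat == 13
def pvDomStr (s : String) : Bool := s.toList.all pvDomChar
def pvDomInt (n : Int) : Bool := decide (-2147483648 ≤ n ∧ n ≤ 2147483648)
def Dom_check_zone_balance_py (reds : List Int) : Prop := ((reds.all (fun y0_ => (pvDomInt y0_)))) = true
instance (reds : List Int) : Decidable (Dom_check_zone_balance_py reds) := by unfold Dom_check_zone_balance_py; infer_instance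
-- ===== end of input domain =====

-- B replaces A's three filter-and-count comprehensions with one pass that buckets each
-- ball via counts[(r-1)//11]; objective: simpler (one traversal instead of three).

-- ===== PORT A =====
-- three list comprehensions with length, then the conjunction of the range checks
def check_zone_balance_py (reds : List Int) : Bool :=
  let zone1 : Int := (reds.filter (fun r => 1 ≤ r ∧ r ≤ 11)).length
  let zone2 : Int := (reds.filter (fun r => 12 ≤ r ∧ r ≤ 22)).length
  let zone3 : Int := (reds.filter (fun r => 23 ≤ r ∧ r ≤ 33)).length
  decide (1 ≤ zone1 ∧ zone1 ≤ 3) && decide (1 ≤ zone2 ∧ zone2 ≤ 3) &&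
    decide (1 ≤ zone3 ∧ zone3 ≤ 3)

-- ===== PORT B =====
-- one-pass bucket step: if 1<=r<=33 increment counter (r-1)//11 (Python floor division)
def pvStep (c : Int × Int × Int) (r : Int) : Int × Int × Int :=
  if 1 ≤ r ∧ r ≤ 33 then
    let i := PySem.Int.floordiv (r - 1) 11
    if i = 0 then (c.1 + 1, c.2.1, c.2.2)
    else if i = 1 then (c.1, c.2.1 + 1, c.2.2)
    else (c.1, c.2.1, c.2.2 + 1)
  else c

def check_zone_balance_py_alt (reds : List Int) : Bool :=
  let counts := reds.foldl pvStep (0, 0, 0)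
  decide (1 ≤ counts.1 ∧ counts.1 ≤ 3) && decide (1 ≤ counts.2.1 ∧ counts.2.1 ≤ 3) &&
    decide (1 ≤ counts.2.2 ∧ counts.2.2 ≤ 3)

-- ===== PRECONDITION & SPEC =====
def Spec_check_zone_balance_py (reds : List Int) (out : Bool) : Prop := out = check_zone_balance_py_alt reds
instance (reds : List Int) (out : Bool) : Decidable (Spec_check_zone_balance_py reds out) := by unfold Spec_check_zone_balance_py; infer_instance

-- ===== CLAIM (what is proved, stated in full; the proofs are below) =====
def Claim_equal_check_zone_balance_py : Prop := ∀ (reds : List Int), Dom_check_zone_balance_py reds → Spec_check_zone_balance_py reds (check_zone_balance_py reds)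

-- ===== LEMMAS AND PROOFS =====

-- the fold's state equals the three filter lengths, shifted by the initial state
theorem pv_fold_counts (reds : List Int) (a b c : Int) :
    reds.foldl pvStep (a, b, c)
    = (a + ((reds.filter (fun r => 1 ≤ r ∧ r ≤ 11)).length : Int),
       b + ((reds.filter (fun r => 12 ≤ r ∧ r ≤ 22)).length : Int),
       c + ((reds.filter (fun r => 23 ≤ r ∧ r ≤ 33)).length : Int)) := by
  induction reds generalizing a b c with
  | nil => simp
  | cons x xs ih =>
    simp only [List.foldl_cons, List.filter_cons]
    by_cases h1 : 1 ≤ x ∧ x ≤ 11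
    · have h2 : ¬ (12 ≤ x ∧ x ≤ 22) := by omega
      have h3 : ¬ (23 ≤ x ∧ x ≤ 33) := by omega
      have hr : (1 ≤ x ∧ x ≤ 33) := ⟨h1.1, by omega⟩
      have hi : (x - 1) / 11 = 0 := by omega
      have hs : pvStep (a, b, c) x = (a + 1, b, c) := by simp [pvStep, hr, hi]
      rw [hs, ih]
      simp [h1, h2, h3, Prod.ext_iff]
      omega
    · by_cases h2 : 12 ≤ x ∧ x ≤ 22
      · have h3 : ¬ (23 ≤ x ∧ x ≤ 33) := by omega
        have hr : (1 ≤ x ∧ x ≤ 33) := ⟨by omega, by omega⟩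
        have hi : (x - 1) / 11 = 1 := by omega
        have hs : pvStep (a, b, c) x = (a, b + 1, c) := by simp [pvStep, hr, hi]
        rw [hs, ih]
        simp [h1, h2, h3, Prod.ext_iff]
        omega
      · by_cases h3 : 23 ≤ x ∧ x ≤ 33
        · have hr : (1 ≤ x ∧ x ≤ 33) := ⟨by omega, by omega⟩
          have hi : (x - 1) / 11 = 2 := by omega
          have hs : pvStep (a, b, c) x = (a, b, c + 1) := by
            simp [pvStep, hr, hi]
          rw [hs, ih]
          simp [h1, h2, h3, Prod.ext_iff]
          omega
        · have hr : ¬ (1 ≤ x ∧ x ≤ 33) := by omega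
          have hs : pvStep (a, b, c) x = (a, b, c) := by simp [pvStep, hr]
          rw [hs, ih]
          simp [h1, h2, h3]

-- ===== VERDICT (by name: the statement is the Claim_ definition above) =====
theorem check_zone_balance_py_spec : Claim_equal_check_zone_balance_py := by
  intro reds _
  unfold Spec_check_zone_balance_py check_zone_balance_py check_zone_balance_py_alt
  simp only [pv_fold_counts, zero_add]
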